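-- pv_equiv track=rewrite | github.com/Mi-Gumi/Algorithm-Study | 2023.05.04/김수찬/비슷한 단어.py | check
-- ===== SOURCE A (Python) =====
-- def check(target,compare):
--     T = target[:]
--     cnt = 0
--     for c in compare:
--         if c in T:
--             T.remove(c)
--         else:
--             cnt += 1
--
--     return 1 if cnt < 2 and len(T) < 2 else 0
-- ===== SOURCE B (Python) =====
-- def check(target, compare):
--     ft = {}
--     for x in target:
--         ft[x] = ft.get(x, 0) + 1
--     fc = {}
--     for x in compare:
--         fc[x] = fc.get(x, 0) + 1
--     matched = sum(min(n, fc.get(x, 0)) for x, n in ft.items())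
--     return 1 if len(compare) - matched < 2 and len(target) - matched < 2 else 0
-- ===== Notes on version B (the rewrite author's own statement) =====
-- stated objective: faster
-- what changed: Replaces the greedy scan-and-remove loop (membership test plus list.remove per element) with two frequency dictionaries built in one pass each; the matched count is the sum of per-key minima and the answer is pure length arithmetic.
import Mathlib
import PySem

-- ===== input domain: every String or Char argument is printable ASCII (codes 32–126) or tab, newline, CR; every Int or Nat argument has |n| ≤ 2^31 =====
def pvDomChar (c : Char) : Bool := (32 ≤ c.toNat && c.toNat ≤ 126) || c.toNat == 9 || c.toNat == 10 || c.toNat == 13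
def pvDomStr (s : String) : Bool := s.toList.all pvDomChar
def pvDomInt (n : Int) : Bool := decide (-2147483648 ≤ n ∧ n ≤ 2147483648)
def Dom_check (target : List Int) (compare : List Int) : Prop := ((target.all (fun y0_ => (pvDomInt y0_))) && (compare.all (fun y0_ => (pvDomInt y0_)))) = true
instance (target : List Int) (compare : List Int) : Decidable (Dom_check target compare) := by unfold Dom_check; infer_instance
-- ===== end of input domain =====

-- B replaces A's greedy scan-and-remove matching loop with two frequency dictionaries
-- plus length arithmetic (faster: one pass per list instead of a scan per element).


-- ===== PORT A =====
-- one step of A's 'for c in compare' loop over the state (T, cnt)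
def checkStep (s : List Int × Int) (c : Int) : List Int × Int :=
  if c ∈ s.1 then ((PySem.List.remove? s.1 c).getD s.1, s.2) else (s.1, s.2 + 1)

def check (target : List Int) (compare : List Int) : Int :=
  let r := compare.foldl checkStep (target, (0 : Int))
  if r.2 < 2 ∧ r.1.length < 2 then 1 else 0

-- ===== PORT B =====
def check_alt (target : List Int) (compare : List Int) : Int :=
  let ft := target.foldl (fun d x => d.insert x (d.getD x 0 + 1)) (PySem.Dict.empty : PySem.Dict Int Int)
  let fc := compare.foldl (fun d x => d.insert x (d.getD x 0 + 1)) (PySem.Dict.empty : PySem.Dict Int Int)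
  let matched := (ft.items.map (fun p => min p.2 (fc.getD p.1 0))).sum
  if (compare.length : Int) - matched < 2 ∧ (target.length : Int) - matched < 2 then 1 else 0

-- ===== PRECONDITION & SPEC =====
def Spec_check (target : List Int) (compare : List Int) (out : Int) : Prop := out = check_alt target compare
instance (target : List Int) (compare : List Int) (out : Int) : Decidable (Spec_check target compare out) := by unfold Spec_check; infer_instance

-- ===== CLAIM (what is proved, stated in full; the proofs are below) =====
def Claim_equal_check : Prop := ∀ (target : List Int) (compare : List Int), Dom_check target compare → Spec_check target compare (check target compare)

-- ===== LEMMAS AND PROOFS =====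

lemma msub_cons_mem (c : Int) (T cs : Multiset Int) (h : c ∈ T) :
    (c ::ₘ cs) - T = cs - T.erase c := by
  ext a
  rw [← Multiset.sub_singleton]
  have hc : 1 ≤ T.count c := Multiset.one_le_count_iff_mem.mpr h
  by_cases hac : a = c
  · subst hac
    simp only [Multiset.count_sub, Multiset.count_cons_self, Multiset.count_singleton_self]
    omega
  · simp only [Multiset.count_sub, Multiset.count_cons_of_ne hac, Multiset.count_singleton,
      if_neg hac]
    omega

lemma msub_cons_not_mem (c : Int) (T cs : Multiset Int) (h : c ∉ T) :
    (c ::ₘ cs) - T = c ::ₘ (cs - T) := by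
  ext a
  have hc : T.count c = 0 := Multiset.count_eq_zero.mpr h
  by_cases hac : a = c
  · subst hac
    simp only [Multiset.count_sub, Multiset.count_cons_self]
    omega
  · simp only [Multiset.count_sub, Multiset.count_cons_of_ne hac]

lemma loopA_spec : ∀ (cs T : List Int) (cnt : Int),
    ((cs.foldl checkStep (T, cnt)).1 : Multiset Int) = (T : Multiset Int) - (cs : Multiset Int)
    ∧ (cs.foldl checkStep (T, cnt)).2
        = cnt + (Multiset.card ((cs : Multiset Int) - (T : Multiset Int)) : Int)
  | [], T, cnt => by simp
  | c :: cs, T, cnt => by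
    by_cases h : c ∈ T
    · have hrem : (PySem.List.remove? T c).getD T = T.erase c := by
        rw [PySem.List.remove?_eq_some_erase _ _ h]; rfl
      have IH := loopA_spec cs (T.erase c) cnt
      have hstep : checkStep (T, cnt) c = (T.erase c, cnt) := by
        simp [checkStep, h, hrem]
      rw [List.foldl_cons, hstep]
      refine ⟨?_, ?_⟩
      · rw [IH.1, ← Multiset.cons_coe, Multiset.sub_cons, Multiset.coe_erase]
      · rw [IH.2, ← Multiset.cons_coe, msub_cons_mem c _ _ (by simpa using h),
          Multiset.coe_erase]
    · have IH := loopA_spec cs T (cnt + 1)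
      have hstep : checkStep (T, cnt) c = (T, cnt + 1) := by
        simp [checkStep, h]
      rw [List.foldl_cons, hstep]
      refine ⟨?_, ?_⟩
      · rw [IH.1, ← Multiset.cons_coe, Multiset.sub_cons,
          Multiset.erase_of_notMem (by simpa using h)]
      · rw [IH.2, ← Multiset.cons_coe, msub_cons_not_mem c _ _ (by simpa using h)]
        simp
        ring
  termination_by cs => cs.length

lemma card_sub_eq (s t : Multiset Int) :
    Multiset.card (s - t) = Multiset.card s - Multiset.card (s ∩ t) := by
  have h1 : s - t = s - (s ∩ t) := by
    ext a
    simp only [Multiset.count_sub, Multiset.count_inter]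
    omega
  rw [h1, Multiset.card_sub Multiset.inter_le_left]

lemma sum_min_eq_card_inter (target compare : List Int) :
    (∑ a ∈ target.toFinset, min (target.count a) (compare.count a))
      = Multiset.card ((target : Multiset Int) ∩ (compare : Multiset Int)) := by
  have hsub : ((target : Multiset Int) ∩ (compare : Multiset Int)).toFinset ⊆ target.toFinset := by
    intro a ha
    rw [Multiset.mem_toFinset] at ha
    rw [List.mem_toFinset]
    exact Multiset.mem_coe.mp (Multiset.mem_of_le Multiset.inter_le_left ha)
  have hzero : ∀ a ∈ target.toFinset,
      a ∉ ((target : Multiset Int) ∩ (compare : Multiset Int)).toFinset →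
      Multiset.count a ((target : Multiset Int) ∩ (compare : Multiset Int)) = 0 := by
    intro a _ ha
    rw [Multiset.mem_toFinset] at ha
    exact Multiset.count_eq_zero.mpr ha
  rw [← Multiset.toFinset_sum_count_eq, Finset.sum_subset hsub hzero]
  apply Finset.sum_congr rfl
  intro a _
  rw [Multiset.count_inter]
  simp

lemma nodup_finset_sum (f : Int → Nat) :
    ∀ (l : List Int), l.Nodup → (∑ a ∈ l.toFinset, f a) = (l.map f).sum
  | [], _ => by simp
  | x :: xs, h => by
    have hx : x ∉ xs := (List.nodup_cons.mp h).1
    rw [List.toFinset_cons, Finset.sum_insert (by simpa using hx), List.map_cons, List.sum_cons,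
      nodup_finset_sum f xs (List.nodup_cons.mp h).2]

lemma ofList_sum_eq_finset_sum (f : Int → Nat) (l : List Int) :
    ((PySem.Set.ofList l).map f).sum = ∑ a ∈ l.toFinset, f a := by
  rw [← nodup_finset_sum f (PySem.Set.ofList l) (PySem.Set.nodup_ofList l)]
  congr 1
  ext a
  simp [PySem.Set.mem_ofList]

lemma sum_map_natCast (l : List Int) (f : Int → Nat) :
    (l.map (fun k => ((f k : Nat) : Int))).sum = (((l.map f).sum : Nat) : Int) := by
  induction l with
  | nil => simp
  | cons x xs ih => simp [ih]

lemma check_eq_check_alt (target compare : List Int) :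
    check target compare = check_alt target compare := by
  have hA := loopA_spec compare target 0
  have hAlen : (compare.foldl checkStep (target, (0:Int))).1.length
      = Multiset.card ((target : Multiset Int) - (compare : Multiset Int)) := by
    rw [← Multiset.coe_card, hA.1]
  -- B's matched sum as a natural number
  have hmatched :
      (((PySem.Dict.counter target).items.map
          (fun p => min p.2 ((PySem.Dict.counter compare).getD p.1 0))).sum : Int)
        = ((Multiset.card ((target : Multiset Int) ∩ (compare : Multiset Int)) : Nat) : Int) := by
    rw [PySem.Dict.items_counter, List.map_map]
    have hfun : ((fun p : Int × Int => min p.2 ((PySem.Dict.counter compare).getD p.1 0)) ∘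
        (fun k => (k, (target.count k : Int))))
        = fun k => ((min (target.count k) (compare.count k) : Nat) : Int) := by
      funext k
      simp [Function.comp, PySem.Dict.getD_counter, Nat.cast_min]
    rw [hfun, sum_map_natCast, ofList_sum_eq_finset_sum, sum_min_eq_card_inter]
  have hcardT : Multiset.card ((target : List Int) : Multiset Int) = target.length :=
    Multiset.coe_card _
  have hcardC : Multiset.card ((compare : List Int) : Multiset Int) = compare.length :=
    Multiset.coe_card _
  have hsubTC := card_sub_eq ((target : List Int) : Multiset Int) ((compare : List Int) : Multiset Int)
  have hsubCT := card_sub_eq ((compare : List Int) : Multiset Int) ((target : List Int) : Multiset Int)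
  have hcomm : ((compare : List Int) : Multiset Int) ∩ ((target : List Int) : Multiset Int)
      = ((target : List Int) : Multiset Int) ∩ ((compare : List Int) : Multiset Int) :=
    Multiset.inter_comm _ _
  have hleT : Multiset.card (((target : List Int) : Multiset Int) ∩ ((compare : List Int) : Multiset Int))
      ≤ target.length := by
    rw [← hcardT]; exact Multiset.card_le_card Multiset.inter_le_left
  have hleC : Multiset.card (((target : List Int) : Multiset Int) ∩ ((compare : List Int) : Multiset Int))
      ≤ compare.length := by
    rw [← hcardC, ← hcomm]; exact Multiset.card_le_card Multiset.inter_le_left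
  unfold check check_alt
  rw [PySem.Dict.foldl_insert_getD_add_one_eq_counter, PySem.Dict.foldl_insert_getD_add_one_eq_counter]
  simp only [hmatched, hA.2, hAlen]
  rw [hcomm] at hsubCT
  by_cases hcond : Multiset.card (((compare : List Int) : Multiset Int) - ((target : List Int) : Multiset Int)) < 2
      ∧ Multiset.card (((target : List Int) : Multiset Int) - ((compare : List Int) : Multiset Int)) < 2
  · rw [if_pos, if_pos]
    · constructor <;> omega
    · exact ⟨by omega, hcond.2⟩
  · rw [if_neg, if_neg]
    · intro hc; apply hcond; constructor <;> omega
    · intro hc; apply hcond; exact ⟨by omega, hc.2⟩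

-- ===== VERDICT (by name: the statement is the Claim_ definition above) =====
theorem check_spec : Claim_equal_check := by
  intro target compare _
  unfold Spec_check
  exact check_eq_check_alt target compare
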